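-- pv_equiv track=rewrite | github.com/nntrobson/SK-v2 | backend/cv_pipeline/validation_package.py | choose_balanced_video_rows
-- ===== SOURCE A (Python) =====
-- from collections import defaultdict, deque
--
-- def choose_balanced_video_rows(rows: list[dict], sample_size: int = 10) -> list[dict]:
--     grouped: dict[str, deque[dict]] = defaultdict(deque)
--     for row in rows:
--         filename = (row.get("Filename") or "").strip()
--         if not filename:
--             continue
--         position = (row.get("Position") or "Unknown").strip()
--         grouped[position].append(row)
--
--     ordered_positions = sorted(grouped.keys())
--     selected: list[dict] = []
--     while len(selected) < sample_size and any(grouped.values()):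
--         for position in ordered_positions:
--             if not grouped[position]:
--                 continue
--             selected.append(grouped[position].popleft())
--             if len(selected) >= sample_size:
--                 break
--     return selected
-- ===== SOURCE B (Python) =====
-- def choose_balanced_video_rows(rows: list[dict], sample_size: int = 10) -> list[dict]:
--     counts: dict[str, int] = {}
--     tagged: list[tuple[int, str, dict]] = []
--     for row in rows:
--         filename = (row.get("Filename") or "").strip()
--         if not filename:
--             continue
--         position = (row.get("Position") or "Unknown").strip()
--         r = counts.get(position, 0)
--         counts[position] = r + 1
--         tagged.append((r, position, row))
--     tagged.sort(key=lambda t: (t[0], t[1]))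
--     return [row for _, _, row in tagged[:max(0, sample_size)]]
-- ===== Notes on version B (the rewrite author's own statement) =====
-- stated objective: alternative
-- what changed: Replaces A's defaultdict-of-deques plus round-robin while/for popleft loop by a single pass that tags each kept row with its within-position occurrence index, one stable sort by the (round, position) key, and a slice.
import Mathlib
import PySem

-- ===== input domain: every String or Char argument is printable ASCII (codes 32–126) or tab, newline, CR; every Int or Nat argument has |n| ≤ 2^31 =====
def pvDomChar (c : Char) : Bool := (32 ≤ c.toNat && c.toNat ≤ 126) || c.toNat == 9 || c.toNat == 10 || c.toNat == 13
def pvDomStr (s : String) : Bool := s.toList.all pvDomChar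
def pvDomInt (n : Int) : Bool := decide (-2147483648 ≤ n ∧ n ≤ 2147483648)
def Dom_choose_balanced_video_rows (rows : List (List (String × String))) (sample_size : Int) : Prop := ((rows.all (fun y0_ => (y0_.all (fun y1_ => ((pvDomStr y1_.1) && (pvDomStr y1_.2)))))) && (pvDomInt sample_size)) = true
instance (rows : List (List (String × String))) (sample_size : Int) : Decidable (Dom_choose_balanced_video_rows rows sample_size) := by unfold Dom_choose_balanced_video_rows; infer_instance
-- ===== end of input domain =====

-- B replaces A's deque round-robin while-loop by tagging each kept row with its
-- within-position index and one stable sort by (round, position); same return value, alternative algorithm.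

-- ===== PORT A =====

-- filename = (row.get("Filename") or "").strip()   (shared by both Pythons' identical filtering lines)
def pvFile (row : List (String × String)) : String :=
  PySem.Str.strip (match (PySem.Dict.mk row).get? "Filename" with
    | none => ""
    | some s => if s = "" then "" else s)

-- position = (row.get("Position") or "Unknown").strip()
def pvPos (row : List (String × String)) : String :=
  PySem.Str.strip (match (PySem.Dict.mk row).get? "Position" with
    | none => "Unknown"
    | some s => if s = "" then "Unknown" else s)

-- grouped: defaultdict(deque); grouped[position].append(row)
def pvGroupA (rows : List (List (String × String))) : PySem.Dict String (List (List (String × String))) :=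
  rows.foldl (fun g row =>
    if pvFile row = "" then g
    else g.modify (pvPos row) [] (fun d => d ++ [row])) PySem.Dict.empty

-- the inner 'for position in ordered_positions' loop (popleft + break when full)
def pvForA : PySem.Dict String (List (List (String × String))) → List String →
    List (List (String × String)) → Int →
    List (List (String × String)) × PySem.Dict String (List (List (String × String)))
  | g, [], sel, _ => (sel, g)
  | g, pos :: rest, sel, n =>
    match g.getD pos [] with
    | [] => pvForA g rest sel n
    | r :: rs =>
      let sel' := sel ++ [r]
      let g' := g.insert pos rs
      if n ≤ (sel'.length : Int) then (sel', g') else pvForA g' rest sel' n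

-- while len(selected) < sample_size and any(grouped.values()):  (fuel bounds the rounds)
def pvWhileA : Nat → PySem.Dict String (List (List (String × String))) → List String →
    List (List (String × String)) → Int → List (List (String × String))
  | 0, _, _, sel, _ => sel
  | fuel + 1, g, ordered, sel, n =>
    if (sel.length : Int) < n ∧ g.values.any (fun v => !v.isEmpty) then
      let p := pvForA g ordered sel n
      pvWhileA fuel p.2 ordered p.1 n
    else sel

def choose_balanced_video_rows (rows : List (List (String × String))) (sample_size : Int) :
    List (List (String × String)) :=
  let grouped := pvGroupA rows
  let ordered := PySem.List.sorted grouped.keys (fun x => x) false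
  pvWhileA (rows.length + 1) grouped ordered [] sample_size

-- ===== PORT B =====

-- counts/tagged loop: r = counts.get(position, 0); counts[position] = r + 1; tagged.append((r, position, row))
def pvTagB (rows : List (List (String × String))) :
    PySem.Dict String Int × List (Int × String × List (String × String)) :=
  rows.foldl (fun st row =>
    if pvFile row = "" then st
    else
      let pos := pvPos row
      let r := st.1.getD pos 0
      (st.1.insert pos (r + 1), st.2 ++ [(r, pos, row)])) (PySem.Dict.empty, [])

def choose_balanced_video_rows_alt (rows : List (List (String × String))) (sample_size : Int) :
    List (List (String × String)) :=
  let tagged := (pvTagB rows).2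
  let sortedT := PySem.List.sorted2 tagged (fun t => t.1) (fun t => t.2.1) false
  (sortedT.take (max 0 sample_size).toNat).map (fun t => t.2.2)

-- ===== PRECONDITION & SPEC =====
def Spec_choose_balanced_video_rows (rows : List (List (String × String))) (sample_size : Int) (out : List (List (String × String))) : Prop := out = choose_balanced_video_rows_alt rows sample_size
instance (rows : List (List (String × String))) (sample_size : Int) (out : List (List (String × String))) : Decidable (Spec_choose_balanced_video_rows rows sample_size out) := by unfold Spec_choose_balanced_video_rows; infer_instance

-- ===== CLAIM (what is proved, stated in full; the proofs are below) =====
def Claim_equal_choose_balanced_video_rows : Prop := ∀ (rows : List (List (String × String))) (sample_size : Int), Dom_choose_balanced_video_rows rows sample_size → Spec_choose_balanced_video_rows rows sample_size (choose_balanced_video_rows rows sample_size)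

-- ===== LEMMAS AND PROOFS =====

-- rows that survive the 'if not filename: continue' filter
def pvKept (rows : List (List (String × String))) : List (List (String × String)) :=
  rows.filter (fun r => decide (¬ pvFile r = ""))

-- the kept rows of one position, in input order (= A's deque for that position)
def pvGrpOf (kept : List (List (String × String))) (p : String) : List (List (String × String)) :=
  kept.filter (fun r => pvPos r == p)

-- a position's rows tagged with their within-position index, starting at k0
def pvTagEnum (p : String) (k0 : Int) (l : List (List (String × String))) :
    List (Int × String × List (String × String)) :=
  (List.range l.length).filterMap (fun (r : Nat) => (l[r]?).map (fun row => (k0 + (r : Int), p, row)))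

-- the tagged rows of round r, positions in 'ordered' order
def pvBlock (kept : List (List (String × String))) (ordered : List String) (r : Nat) :
    List (Int × String × List (String × String)) :=
  ordered.filterMap (fun p => ((pvGrpOf kept p)[r]?).map (fun row => ((r : Int), p, row)))

-- the first j rounds, concatenated
def pvRounds (kept : List (List (String × String))) (ordered : List String) (j : Nat) :
    List (Int × String × List (String × String)) :=
  (List.range j).flatMap (pvBlock kept ordered)

def pvThird (l : List (Int × String × List (String × String))) : List (List (String × String)) :=
  l.map (fun t => t.2.2)

-- a skip-style if-fold is a fold over the filter
theorem pv_foldl_skip_if {α δ : Type} (p : α → Prop) [DecidablePred p] (f : δ → α → δ)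
    (l : List α) (init : δ) :
    l.foldl (fun acc x => if p x then acc else f acc x) init
      = (l.filter (fun x => decide (¬ p x))).foldl f init := by
  have h1 : List.foldl (fun acc x => if p x then acc else f acc x) init l
      = List.foldl (fun acc x => if ¬ p x then f acc x else acc) init l :=
    PySem.List.foldl_congr_mem l _ _ init (by intro acc x _; by_cases h : p x <;> simp [h])
  rw [h1]
  exact PySem.List.foldl_ite_eq_foldl_filter _ _ _ _

theorem pvGroupA_eq (rows : List (List (String × String))) :
    pvGroupA rows = (pvKept rows).foldl
      (fun g row => g.modify (pvPos row) [] (fun d => d ++ [row])) PySem.Dict.empty := by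
  unfold pvGroupA pvKept
  exact pv_foldl_skip_if _ _ _ _

theorem pvTagB_eq (rows : List (List (String × String))) :
    pvTagB rows = (pvKept rows).foldl
      (fun st row =>
        (st.1.insert (pvPos row) (st.1.getD (pvPos row) 0 + 1),
         st.2 ++ [(st.1.getD (pvPos row) 0, pvPos row, row)])) (PySem.Dict.empty, []) := by
  unfold pvTagB pvKept
  exact pv_foldl_skip_if _ _ _ _

theorem getD_pvGroupA (rows : List (List (String × String))) (p : String) :
    (pvGroupA rows).getD p [] = pvGrpOf (pvKept rows) p := by
  rw [pvGroupA_eq]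
  have h := PySem.Dict.getD_foldl_modify_append
    ((pvKept rows).map (fun r => (pvPos r, r))) PySem.Dict.empty p
  rw [List.foldl_map] at h
  simp only [h, PySem.Dict.getD_empty, List.nil_append, List.filter_map, List.map_map]
  unfold pvGrpOf
  simp [Function.comp_def]

theorem keys_pvGroupA (rows : List (List (String × String))) :
    (pvGroupA rows).keys = PySem.Set.ofList ((pvKept rows).map pvPos) := by
  rw [pvGroupA_eq]
  have h := PySem.Dict.keys_foldl_modify_key (pvKept rows) pvPos ([] : List (List (String × String)))
    (fun d x v => v ++ [x]) PySem.Dict.empty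
  simp only [h, PySem.Dict.keys_empty]
  rfl

theorem pvTagEnum_cons (p : String) (k : Int) (x : List (String × String))
    (l : List (List (String × String))) :
    pvTagEnum p k (x :: l) = (k, p, x) :: pvTagEnum p (k + 1) l := by
  unfold pvTagEnum
  simp only [List.length_cons, List.range_succ_eq_map, List.filterMap_cons,
    List.filterMap_map, Function.comp_def, List.getElem?_cons_zero, Option.map_some,
    Nat.cast_zero, add_zero]
  refine congrArg₂ _ rfl ?_
  apply List.filterMap_congr
  intro r hr
  simp only [List.getElem?_cons_succ]
  congr 1
  funext row
  congr 1
  push_cast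
  ring

-- invariant of B's tagging loop
theorem pvTag_fold (l : List (List (String × String)))
    (st : PySem.Dict String Int × List (Int × String × List (String × String)))
    (hI : ∀ q, st.1.getD q 0 = ((st.2.filter (fun t => t.2.1 == q)).length : Int)) :
    (∀ q, (l.foldl (fun st row =>
        (st.1.insert (pvPos row) (st.1.getD (pvPos row) 0 + 1),
         st.2 ++ [(st.1.getD (pvPos row) 0, pvPos row, row)])) st).2.filter (fun t => t.2.1 == q)
      = st.2.filter (fun t => t.2.1 == q)
        ++ pvTagEnum q ((st.2.filter (fun t => t.2.1 == q)).length : Int)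
             (l.filter (fun r => pvPos r == q))) := by
  induction l generalizing st with
  | nil => intro q; simp [pvTagEnum]
  | cons row l ih =>
    intro q
    have hI' : ∀ q', ((st.1.insert (pvPos row) (st.1.getD (pvPos row) 0 + 1),
        st.2 ++ [(st.1.getD (pvPos row) 0, pvPos row, row)]) :
          PySem.Dict String Int × List (Int × String × List (String × String))).1.getD q' 0
        = ((((st.1.insert (pvPos row) (st.1.getD (pvPos row) 0 + 1),
        st.2 ++ [(st.1.getD (pvPos row) 0, pvPos row, row)]) :
          PySem.Dict String Int × List (Int × String × List (String × String))).2.filter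
            (fun t => t.2.1 == q')).length : Int) := by
      intro q'
      simp only [PySem.Dict.getD_insert, List.filter_append, List.filter_singleton]
      by_cases hq : q' = pvPos row
      · subst hq
        rw [if_pos rfl, hI (pvPos row)]
        simp
      · rw [if_neg hq, hI q']
        have hb : (pvPos row == q') = false := beq_eq_false_iff_ne.mpr (Ne.symm hq)
        simp [hb]
    have h' := ih _ hI' q
    simp only [List.foldl_cons] at h' ⊢
    rw [h']
    simp only [List.filter_append, List.filter_cons]
    by_cases hq : pvPos row = q
    · have hb : (((st.1.getD (pvPos row) 0, pvPos row, row) :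
          Int × String × List (String × String)).2.1 == q) = true := by simp [hq]
      have hb2 : (decide (pvPos row == q) = true) := by simp [hq]
      simp only [hb, ite_true, hq, beq_self_eq_true]
      rw [pvTagEnum_cons]
      simp only [List.filter_nil, List.append_nil, List.length_cons, List.length_nil]
      rw [hI q]
      simp only [List.length_append, List.length_singleton, List.append_assoc,
        List.singleton_append]
      push_cast
      ring_nf
    · have hb : (((st.1.getD (pvPos row) 0, pvPos row, row) :
          Int × String × List (String × String)).2.1 == q) = false := by simp [hq]
      have hb2 : ((pvPos row == q) : Bool) = false := by simp [hq]
      simp [List.filter_singleton, hb, hb2]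


theorem pvTagB_filter (rows : List (List (String × String))) (p : String) :
    (pvTagB rows).2.filter (fun t => t.2.1 == p) = pvTagEnum p 0 (pvGrpOf (pvKept rows) p) := by
  rw [pvTagB_eq]
  have h := pvTag_fold (pvKept rows) (PySem.Dict.empty, [])
    (by intro q; simp [PySem.Dict.getD_empty]) p
  simpa [pvGrpOf] using h

theorem pvBlock_filter (kept : List (List (String × String))) (ordered : List String)
    (h : ordered.Nodup) (r : Nat) (p : String) :
    (pvBlock kept ordered r).filter (fun t => t.2.1 == p)
      = if p ∈ ordered
        then (((pvGrpOf kept p)[r]?).map (fun row => ((r : Int), p, row))).toList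
        else [] := by
  revert h
  induction ordered with
  | nil => intro h; simp [pvBlock]
  | cons q os ih =>
    intro h
    have hq : q ∉ os := (List.nodup_cons.mp h).1
    have hos : os.Nodup := (List.nodup_cons.mp h).2
    simp only [pvBlock] at ih ⊢
    cases hO : (pvGrpOf kept q)[r]? with
    | none =>
      rw [List.filterMap_cons_none (by simp [hO])]
      rw [ih hos]
      by_cases hpq : p = q
      · subst hpq
        simp [hq, hO]
      · simp [List.mem_cons, hpq]
    | some row =>
      rw [List.filterMap_cons_some (b := ((r : Int), q, row)) (by simp [hO])]
      simp only [List.filter_cons]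
      by_cases hpq : p = q
      · subst hpq
        have hb : ((((r : Int), p, row) : Int × String × List (String × String)).2.1 == p)
            = true := by simp
        rw [ih hos]
        simp [hb, hq, hO]
      · have hb : ((((r : Int), q, row) : Int × String × List (String × String)).2.1 == p)
            = false := by simp [Ne.symm hpq]
        rw [ih hos]
        simp [hb, List.mem_cons, hpq]

theorem pvRounds_filter (kept : List (List (String × String))) (ordered : List String)
    (h : ordered.Nodup) (T : Nat) (p : String)
    (hT : (pvGrpOf kept p).length ≤ T) (hp : p ∈ ordered) :
    (pvRounds kept ordered T).filter (fun t => t.2.1 == p) = pvTagEnum p 0 (pvGrpOf kept p) := by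
  unfold pvRounds
  rw [List.filter_flatMap]
  have hcg : List.flatMap (fun a => List.filter (fun t => t.2.1 == p) (pvBlock kept ordered a))
        (List.range T)
      = List.flatMap (fun (r : Nat) => (((pvGrpOf kept p)[r]?).map
          (fun row => ((r : Int), p, row))).toList) (List.range T) :=
    by apply List.flatMap_congr; intro r _; rw [pvBlock_filter kept ordered h r p, if_pos hp]
  rw [hcg]
  rw [← List.filterMap_eq_flatMap_toList]
  have hsplit : T = (pvGrpOf kept p).length + (T - (pvGrpOf kept p).length) := by omega
  rw [hsplit, List.range_add, List.filterMap_append, List.filterMap_map]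
  have h2 : List.filterMap ((fun (r : Nat) => Option.map (fun row => ((r : Int), p, row))
        (pvGrpOf kept p)[r]?) ∘ (fun x => (pvGrpOf kept p).length + x))
      (List.range (T - (pvGrpOf kept p).length)) = [] := by
    rw [List.filterMap_eq_nil_iff.mpr]
    intro a _
    simp only [Function.comp_apply]
    rw [List.getElem?_eq_none (by omega)]
    rfl
  rw [h2, List.append_nil]
  unfold pvTagEnum
  apply List.filterMap_congr
  intro r _
  simp

theorem pvRounds_filter_not_mem (kept : List (List (String × String))) (ordered : List String)
    (h : ordered.Nodup) (T : Nat) (p : String) (hp : p ∉ ordered) :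
    (pvRounds kept ordered T).filter (fun t => t.2.1 == p) = [] := by
  unfold pvRounds
  rw [List.filter_flatMap]
  have hcg : List.flatMap (fun a => List.filter (fun t => t.2.1 == p) (pvBlock kept ordered a))
        (List.range T)
      = List.flatMap (fun (_ : Nat) => ([] : List (Int × String × List (String × String))))
          (List.range T) :=
    by apply List.flatMap_congr; intro r _; rw [pvBlock_filter kept ordered h r p, if_neg hp]
  rw [hcg]
  simp

theorem pvGrpOf_nil_of_not_mem (kept : List (List (String × String))) (p : String)
    (hp : p ∉ kept.map pvPos) : pvGrpOf kept p = [] := by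
  unfold pvGrpOf
  rw [List.filter_eq_nil_iff]
  intro r hr hbeq
  exact hp (List.mem_map.mpr ⟨r, hr, beq_iff_eq.mp hbeq⟩)

theorem pvRounds_perm_tagged (rows : List (List (String × String))) (ordered : List String)
    (h : ordered.Nodup) (hmem : ∀ p, p ∈ ordered ↔ p ∈ (pvKept rows).map pvPos) :
    (pvRounds (pvKept rows) ordered (pvKept rows).length).Perm (pvTagB rows).2 := by
  rw [List.perm_iff_count]
  intro a
  have h1 : List.count a (pvRounds (pvKept rows) ordered (pvKept rows).length)
      = List.count a ((pvRounds (pvKept rows) ordered (pvKept rows).length).filter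
          (fun t => t.2.1 == a.2.1)) :=
    (List.count_filter (by simp)).symm
  have h2 : List.count a (pvTagB rows).2
      = List.count a ((pvTagB rows).2.filter (fun t => t.2.1 == a.2.1)) :=
    (List.count_filter (by simp)).symm
  rw [h1, h2, pvTagB_filter]
  by_cases hp : a.2.1 ∈ ordered
  · rw [pvRounds_filter (pvKept rows) ordered h (pvKept rows).length a.2.1
      (List.length_filter_le _ _) hp]
  · rw [pvRounds_filter_not_mem (pvKept rows) ordered h (pvKept rows).length a.2.1 hp]
    rw [pvGrpOf_nil_of_not_mem (pvKept rows) a.2.1 (fun hm => hp ((hmem a.2.1).mpr hm))]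
    simp [pvTagEnum]

theorem pv_pairwise_flatMap {α : Type} (R : α → α → Prop) (f : Nat → List α) (l : List Nat)
    (hl : l.Pairwise (· < ·)) (hin : ∀ r ∈ l, (f r).Pairwise R)
    (hcross : ∀ r s : Nat, r < s → ∀ a ∈ f r, ∀ b ∈ f s, R a b) :
    (l.flatMap f).Pairwise R := by
  induction l with
  | nil => simp
  | cons r l ih =>
    simp only [List.flatMap_cons]
    rw [List.pairwise_append]
    refine ⟨hin r List.mem_cons_self, ih hl.of_cons (fun s hs => hin s (List.mem_cons_of_mem _ hs)), ?_⟩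
    intro a ha b hb
    obtain ⟨s, hs, hbs⟩ := List.mem_flatMap.mp hb
    exact hcross r s (List.rel_of_pairwise_cons hl hs) a ha b hbs

theorem pvRounds_pairwise (kept : List (List (String × String))) (ordered : List String)
    (h : ordered.Pairwise (· < ·)) (T : Nat) :
    (pvRounds kept ordered T).Pairwise
      (fun a b => a.1 < b.1 ∨ (a.1 = b.1 ∧ a.2.1 < b.2.1)) := by
  unfold pvRounds
  apply pv_pairwise_flatMap _ _ _ (List.pairwise_lt_range)
  · intro r _
    unfold pvBlock
    rw [List.pairwise_filterMap]
    apply h.imp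
    intro p q hpq
    intro b hb b' hb'
    obtain ⟨row, _, rfl⟩ := Option.map_eq_some_iff.mp hb
    obtain ⟨row', _, rfl⟩ := Option.map_eq_some_iff.mp hb'
    exact Or.inr ⟨rfl, hpq⟩
  · intro r s hrs a ha b hb
    obtain ⟨p, _, hpa⟩ := List.mem_filterMap.mp ha
    obtain ⟨q, _, hqb⟩ := List.mem_filterMap.mp hb
    obtain ⟨row, _, rfl⟩ := Option.map_eq_some_iff.mp hpa
    obtain ⟨row', _, rfl⟩ := Option.map_eq_some_iff.mp hqb
    exact Or.inl (by simp only []; exact_mod_cast hrs)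

theorem pv_sorted2_eq_sorted_lex {α : Type} (xs : List α) (k1 : α → Int) (k2 : α → String) :
    PySem.List.sorted2 xs k1 k2 false
      = PySem.List.sorted xs (fun x => toLex (k1 x, k2 x)) false := by
  unfold PySem.List.sorted2 PySem.List.sorted
  simp only [Bool.false_eq_true, if_false]
  congr 1
  funext acc x
  congr 1
  funext a b
  rcases lt_trichotomy (k1 a) (k1 b) with h | h | h
  · simp [Prod.Lex.lt_iff, h]
  · simp [Prod.Lex.lt_iff, h, lt_irrefl]
  · simp [Prod.Lex.lt_iff, h, not_lt_of_gt h, not_lt_of_gt, Ne.symm (ne_of_gt h)]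

theorem pv_sorted2_tagged (rows : List (List (String × String))) (ordered : List String)
    (hpw : ordered.Pairwise (· < ·))
    (hmem : ∀ p, p ∈ ordered ↔ p ∈ (pvKept rows).map pvPos) :
    PySem.List.sorted2 (pvTagB rows).2 (fun t => t.1) (fun t => t.2.1) false
      = pvRounds (pvKept rows) ordered (pvKept rows).length := by
  rw [pv_sorted2_eq_sorted_lex]
  apply PySem.List.sorted_eq_of_perm_of_pairwise_lt
  · exact pvRounds_perm_tagged rows ordered (hpw.imp (fun hab => ne_of_lt hab)) hmem
  · apply (pvRounds_pairwise (pvKept rows) ordered hpw (pvKept rows).length).imp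
    intro a b hab
    exact Prod.Lex.lt_iff.mpr (by simpa using hab)

-- ===== A-side loop characterisation =====

theorem pvForA_spec (kept : List (List (String × String))) (j : Nat) (n : Int) :
    ∀ (os : List String) (g : PySem.Dict String (List (List (String × String))))
      (sel : List (List (String × String))),
      os.Nodup →
      (∀ p ∈ os, g.getD p [] = (pvGrpOf kept p).drop j) →
      (∀ p ∈ os, g.contains p = true) →
      ((sel.length : Int) < n) →
      (pvForA g os sel n).1
          = sel ++ (os.filterMap (fun p => (pvGrpOf kept p)[j]?)).take (n - sel.length).toNat
      ∧ (((sel.length : Int) + ((os.filterMap (fun p => (pvGrpOf kept p)[j]?)).length : Int) < n) →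
          (pvForA g os sel n).1 = sel ++ os.filterMap (fun p => (pvGrpOf kept p)[j]?)
          ∧ (∀ q, (pvForA g os sel n).2.getD q []
              = if q ∈ os then (pvGrpOf kept q).drop (j + 1) else g.getD q [])
          ∧ (pvForA g os sel n).2.keys = g.keys) := by
  intro os
  induction os with
  | nil =>
    intro g sel _ _ _ hlen
    refine ⟨by simp [pvForA], fun _ => ⟨by simp [pvForA], fun q => by simp [pvForA], rfl⟩⟩
  | cons pos rest ih =>
    intro g sel hnd hdrop hcont hlen
    obtain ⟨hposr, hndr⟩ := List.nodup_cons.mp hnd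
    have hg : g.getD pos [] = (pvGrpOf kept pos).drop j := hdrop pos List.mem_cons_self
    cases hdj : (pvGrpOf kept pos).drop j with
    | nil =>
      have hj : (pvGrpOf kept pos)[j]? = none :=
        List.getElem?_eq_none (List.drop_eq_nil_iff.mp hdj)
      have hred : pvForA g (pos :: rest) sel n = pvForA g rest sel n := by
        show (match g.getD pos [] with
          | [] => pvForA g rest sel n
          | r :: rs =>
            let sel' := sel ++ [r]
            let g' := g.insert pos rs
            if n ≤ (sel'.length : Int) then (sel', g') else pvForA g' rest sel' n) = _
        rw [hg, hdj]
      have hfm : (pos :: rest).filterMap (fun p => (pvGrpOf kept p)[j]?)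
          = rest.filterMap (fun p => (pvGrpOf kept p)[j]?) :=
        List.filterMap_cons_none hj
      rw [hred, hfm]
      obtain ⟨ihf, ihs⟩ := ih g sel hndr (fun p hp => hdrop p (List.mem_cons_of_mem _ hp))
        (fun p hp => hcont p (List.mem_cons_of_mem _ hp)) hlen
      refine ⟨ihf, fun hall => ?_⟩
      obtain ⟨h1, h2, h3⟩ := ihs hall
      refine ⟨h1, fun q => ?_, h3⟩
      rw [h2 q]
      by_cases hq : q ∈ rest
      · simp [hq]
      · by_cases hqp : q = pos
        · rw [if_neg hq, if_pos (by rw [hqp]; exact List.mem_cons_self), hqp, hg, hdj,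
            (List.drop_eq_nil_iff.mpr (by have := List.drop_eq_nil_iff.mp hdj; omega) :
              (pvGrpOf kept pos).drop (j + 1) = [])]
        · rw [if_neg hq, if_neg (by simp [hqp, hq])]
    | cons r rs =>
      have hj : (pvGrpOf kept pos)[j]? = some r := by
        rw [← List.head?_drop, hdj]; rfl
      have hrs : rs = (pvGrpOf kept pos).drop (j + 1) := by
        have ht := List.tail_drop (l := pvGrpOf kept pos) (i := j)
        rw [hdj] at ht
        simpa using ht
      have hred : pvForA g (pos :: rest) sel n
          = (if n ≤ ((sel ++ [r]).length : Int) then (sel ++ [r], g.insert pos rs)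
             else pvForA (g.insert pos rs) rest (sel ++ [r]) n) := by
        show (match g.getD pos [] with
          | [] => pvForA g rest sel n
          | r :: rs =>
            let sel' := sel ++ [r]
            let g' := g.insert pos rs
            if n ≤ (sel'.length : Int) then (sel', g') else pvForA g' rest sel' n) = _
        rw [hg, hdj]
      have hfm : (pos :: rest).filterMap (fun p => (pvGrpOf kept p)[j]?)
          = r :: rest.filterMap (fun p => (pvGrpOf kept p)[j]?) :=
        List.filterMap_cons_some hj
      rw [hred, hfm]
      by_cases hstop : n ≤ ((sel ++ [r]).length : Int)
      · rw [if_pos hstop]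
        simp only [List.length_append, List.length_singleton] at hstop
        have hn : n = (sel.length : Int) + 1 := by push_cast at hstop ⊢; omega
        constructor
        · have h1 : (n - (sel.length : Int)).toNat = 1 := by omega
          rw [h1, List.take_succ_cons, List.take_zero]
        · intro habs
          exfalso
          simp only [List.length_cons] at habs
          push_cast at habs
          omega
      · rw [if_neg hstop]
        simp only [List.length_append, List.length_singleton] at hstop
        have hlen' : (((sel ++ [r]).length : Nat) : Int) < n := by
          simp only [List.length_append, List.length_singleton]
          push_cast at hstop ⊢
          omega
        have hdrop' : ∀ p ∈ rest, (g.insert pos rs).getD p [] = (pvGrpOf kept p).drop j := by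
          intro p hp
          rw [PySem.Dict.getD_insert]
          rw [if_neg (by rintro rfl; exact hposr hp)]
          exact hdrop p (List.mem_cons_of_mem _ hp)
        have hcont' : ∀ p ∈ rest, (g.insert pos rs).contains p = true := by
          intro p hp
          rw [PySem.Dict.contains_insert]
          simp [hcont p (List.mem_cons_of_mem _ hp)]
        obtain ⟨ihfst, ihsnd⟩ := ih (g.insert pos rs) (sel ++ [r]) hndr hdrop' hcont' hlen'
        constructor
        · rw [ihfst]
          have harith : ((n - (sel.length : Int))).toNat
              = ((n - ((sel ++ [r]).length : Int))).toNat + 1 := by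
            simp only [List.length_append, List.length_singleton]
            push_cast
            omega
          rw [harith, List.take_succ_cons, List.append_assoc, List.singleton_append]
        · intro hall
          simp only [List.length_cons] at hall
          have hall' : (((sel ++ [r]).length : Nat) : Int)
              + ((rest.filterMap (fun p => (pvGrpOf kept p)[j]?)).length : Int) < n := by
            simp only [List.length_append, List.length_singleton]
            push_cast at hall ⊢
            omega
          obtain ⟨h1, h2, h3⟩ := ihsnd hall'
          refine ⟨?_, ?_, ?_⟩
          · rw [h1, List.append_assoc, List.singleton_append]
          · intro q
            rw [h2 q]
            by_cases hq : q ∈ rest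
            · simp [hq, List.mem_cons_of_mem]
            · by_cases hqp : q = pos
              · subst hqp
                rw [if_neg hq, if_pos List.mem_cons_self, PySem.Dict.getD_insert, if_pos rfl]
                exact hrs
              · rw [if_neg hq, if_neg (by simp [hqp, hq]), PySem.Dict.getD_insert, if_neg hqp]
          · rw [h3, PySem.Dict.keys_insert_of_contains _ _ (hcont pos List.mem_cons_self)]

theorem pvBlock_nil_of_le (kept : List (List (String × String))) (ordered : List String)
    (r : Nat) (h : kept.length <= r) : pvBlock kept ordered r = [] := by
  unfold pvBlock
  rw [List.filterMap_eq_nil_iff]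
  intro p _
  have hl : (pvGrpOf kept p).length <= r := le_trans (List.length_filter_le _ _) h
  rw [List.getElem?_eq_none hl]
  rfl

theorem pvRounds_eq_of_blocks_nil (kept : List (List (String × String))) (ordered : List String)
    (j1 j2 : Nat) (h12 : j1 <= j2) (h : ∀ r, j1 <= r → pvBlock kept ordered r = []) :
    pvRounds kept ordered j2 = pvRounds kept ordered j1 := by
  unfold pvRounds
  have hs : j2 = j1 + (j2 - j1) := by omega
  rw [hs, List.range_add, List.flatMap_append]
  have h0 : List.flatMap (pvBlock kept ordered)
      (List.map (fun x => j1 + x) (List.range (j2 - j1))) = [] := by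
    rw [List.flatMap_eq_nil_iff]
    intro r hr
    obtain ⟨x, _, rfl⟩ := List.mem_map.mp hr
    exact h _ (by omega)
  rw [h0, List.append_nil]

theorem pvRounds_succ (kept : List (List (String × String))) (ordered : List String) (j : Nat) :
    pvRounds kept ordered (j + 1) = pvRounds kept ordered j ++ pvBlock kept ordered j := by
  unfold pvRounds
  rw [List.range_succ, List.flatMap_append]
  simp

theorem pvThird_block (kept : List (List (String × String))) (ordered : List String) (j : Nat) :
    pvThird (pvBlock kept ordered j) = ordered.filterMap (fun p => (pvGrpOf kept p)[j]?) := by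
  unfold pvThird pvBlock
  rw [List.map_filterMap]
  apply List.filterMap_congr
  intro p _
  cases (pvGrpOf kept p)[j]? <;> rfl

theorem pvThird_append (a b : List (Int × String × List (String × String))) :
    pvThird (a ++ b) = pvThird a ++ pvThird b := by
  unfold pvThird
  exact List.map_append ..

theorem pvWhileA_spec (rows : List (List (String × String))) (ordered : List String) (n : Int)
    (hpw : ordered.Pairwise (· < ·))
    (hmem : ∀ p, p ∈ ordered ↔ p ∈ (pvKept rows).map pvPos) :
    ∀ (fuel j : Nat) (g : PySem.Dict String (List (List (String × String))))
      (sel : List (List (String × String))),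
      (∀ p, g.getD p [] = (pvGrpOf (pvKept rows) p).drop j) →
      (∀ p ∈ ordered, g.contains p = true) →
      g.keys.Nodup →
      ordered.Perm g.keys →
      sel = pvThird (pvRounds (pvKept rows) ordered j) →
      ((sel.length : Int) ≤ max 0 n) →
      1 ≤ fuel → (pvKept rows).length + 1 ≤ fuel + j →
      pvWhileA fuel g ordered sel n
        = (pvThird (pvRounds (pvKept rows) ordered (pvKept rows).length)).take (max 0 n).toNat := by
  intro fuel
  induction fuel with
  | zero => intro j g sel _ _ _ _ _ _ hf1 _; omega
  | succ fuel ih =>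
    intro j g sel hdrop hcont hnd hperm hsel hselle hf1 hfj
    have hvals : (g.values.any (fun v => !v.isEmpty))
        = ordered.any (fun p => !(g.getD p []).isEmpty) := by
      rw [PySem.Dict.values_eq_map_keys g hnd [], List.any_map]
      exact (hperm.any_eq).symm
    rw [pvWhileA]
    by_cases hC1 : (sel.length : Int) < n
    · by_cases hC2 : (g.values.any (fun v => !v.isEmpty)) = true
      · -- the loop body runs
        rw [if_pos ⟨hC1, hC2⟩]
        have hex : ∃ p ∈ ordered, g.getD p [] ≠ [] := by
          rw [hvals] at hC2
          obtain ⟨p, hp, hb⟩ := List.any_eq_true.mp hC2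
          exact ⟨p, hp, by simpa using hb⟩
        obtain ⟨p0, hp0, hne0⟩ := hex
        have hjT : j < (pvKept rows).length := by
          rw [hdrop p0] at hne0
          have h1 : j < (pvGrpOf (pvKept rows) p0).length := by
            by_contra hle
            exact hne0 (List.drop_eq_nil_iff.mpr (by omega))
          have h2 : (pvGrpOf (pvKept rows) p0).length ≤ (pvKept rows).length :=
            List.length_filter_le _ _
          omega
        have hndord : ordered.Nodup := hpw.imp (fun h => ne_of_lt h)
        obtain ⟨hfst, hsnd⟩ := pvForA_spec (pvKept rows) j n ordered g sel hndord
          (fun p _ => hdrop p) hcont hC1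
        by_cases hbrk : (sel.length : Int)
            + ((ordered.filterMap (fun p => (pvGrpOf (pvKept rows) p)[j]?)).length : Int) < n
        · -- no break: a full round was taken, recurse
          obtain ⟨h1, h2, h3⟩ := hsnd hbrk
          apply ih (j + 1) (pvForA g ordered sel n).2 (pvForA g ordered sel n).1
          · intro p
            rw [h2 p]
            by_cases hp : p ∈ ordered
            · rw [if_pos hp]
            · rw [if_neg hp, hdrop p,
                pvGrpOf_nil_of_not_mem _ p (fun hm' => hp ((hmem p).mpr hm'))]
              simp
          · intro p hp
            rw [PySem.Dict.contains_iff_mem_keys, h3]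
            exact (PySem.Dict.contains_iff_mem_keys g p).mp (hcont p hp)
          · rw [h3]; exact hnd
          · rw [h3]; exact hperm
          · rw [h1, pvRounds_succ, pvThird_append, pvThird_block, hsel]
          · rw [h1]
            have hmx : n ≤ max 0 n := le_max_right 0 n
            rw [List.length_append]
            push_cast
            push_cast at hbrk
            omega
          · omega
          · omega
        · -- break: the round fills the selection to exactly n rows
          rw [Int.not_lt] at hbrk
          show pvWhileA fuel (pvForA g ordered sel n).2 ordered (pvForA g ordered sel n).1 n = _
          rw [hfst]
          have hfuel1 : 1 ≤ fuel := by omega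
          obtain ⟨fuel', rfl⟩ : ∃ f', fuel = f' + 1 := ⟨fuel - 1, by omega⟩
          rw [pvWhileA]
          have hlenf : (((sel ++ (ordered.filterMap
                (fun p => (pvGrpOf (pvKept rows) p)[j]?)).take
                  (n - (sel.length : Int)).toNat).length : Int)) = n := by
            rw [List.length_append, List.length_take]
            push_cast
            omega
          rw [if_neg (fun hc => absurd hc.1 (by rw [hlenf]; omega))]
          -- identify with the first n rows of the full round-robin list
          have hTsplit : pvRounds (pvKept rows) ordered (pvKept rows).length
              = pvRounds (pvKept rows) ordered (j + 1)
                ++ (List.map (fun x => (j + 1) + x)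
                    (List.range ((pvKept rows).length - (j + 1)))).flatMap
                      (pvBlock (pvKept rows) ordered) := by
            conv_lhs => rw [show (pvKept rows).length = (j + 1) + ((pvKept rows).length - (j + 1))
              by omega]
            unfold pvRounds
            rw [List.range_add, List.flatMap_append]
          rw [hTsplit, pvRounds_succ, pvThird_append, pvThird_append, pvThird_block, ← hsel]
          rw [List.append_assoc, List.take_append]
          have htk1 : (max 0 n).toNat - sel.length
              = (n - (sel.length : Int)).toNat := by omega
          have htk2 : sel.take (max 0 n).toNat = sel := List.take_of_length_le (by omega)
          rw [htk1, htk2, List.take_append]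
          have htk3 : (n - (sel.length : Int)).toNat
              - (ordered.filterMap (fun p => (pvGrpOf (pvKept rows) p)[j]?)).length = 0 := by
            omega
          rw [htk3, List.take_zero, List.append_nil]
      · -- no rows left anywhere: selection is complete
        rw [if_neg (fun hc => hC2 hc.2)]
        have hempty : ∀ p ∈ ordered, (pvGrpOf (pvKept rows) p).length ≤ j := by
          intro p hp
          have hC2' : ¬ (ordered.any (fun p => !(g.getD p []).isEmpty) = true) := by
            rw [hvals] at hC2
            exact hC2
          have hne : ¬ ((!(g.getD p []).isEmpty) = true) :=
            fun hbb => hC2' (List.any_eq_true.mpr ⟨p, hp, hbb⟩)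
          have hnil : g.getD p [] = [] := by simpa using hne
          rw [hdrop p] at hnil
          exact List.drop_eq_nil_iff.mp hnil
        have hblocks : ∀ r, j ≤ r → pvBlock (pvKept rows) ordered r = [] := by
          intro r hr
          unfold pvBlock
          rw [List.filterMap_eq_nil_iff]
          intro p hp
          rw [List.getElem?_eq_none (le_trans (hempty p hp) hr)]
          rfl
        have hfull : pvRounds (pvKept rows) ordered (pvKept rows).length
            = pvRounds (pvKept rows) ordered j := by
          rcases (by omega : j <= (pvKept rows).length ∨ (pvKept rows).length < j) with hj | hj
          · exact pvRounds_eq_of_blocks_nil _ _ j _ hj hblocks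
          · rw [pvRounds_eq_of_blocks_nil (pvKept rows) ordered (pvKept rows).length j hj.le
              (fun r hr => pvBlock_nil_of_le _ _ r hr)]
        rw [hfull, ← hsel]
        exact (List.take_of_length_le (by omega)).symm
    · -- len(selected) ≥ sample_size: the loop stops
      rw [if_neg (fun hc => hC1 hc.1)]
      rcases (by omega : n <= 0 ∨ 0 < n) with hn0 | hn0
      · have hm0 : max 0 n = 0 := max_eq_left hn0
        have hsel0 : sel = [] := by
          rw [hm0] at hselle
          exact List.eq_nil_of_length_eq_zero (by omega)
        rw [hsel0, hm0]
        simp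
      · have hlen : (sel.length : Int) = n := by
          have hmx : max 0 n = n := max_eq_right hn0.le
          rw [hmx] at hselle
          omega
        rcases (by omega : j <= (pvKept rows).length ∨ (pvKept rows).length < j) with hjT | hjT
        · have hsplit : pvRounds (pvKept rows) ordered (pvKept rows).length
              = pvRounds (pvKept rows) ordered j
                ++ (List.map (fun x => j + x)
                    (List.range ((pvKept rows).length - j))).flatMap
                      (pvBlock (pvKept rows) ordered) := by
            conv_lhs => rw [show (pvKept rows).length = j + ((pvKept rows).length - j) by omega]
            unfold pvRounds
            rw [List.range_add, List.flatMap_append]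
          rw [hsplit, pvThird_append, ← hsel, List.take_append]
          have h1 : (max 0 n).toNat = sel.length := by omega
          rw [h1, List.take_length, Nat.sub_self, List.take_zero, List.append_nil]
        · rw [← pvRounds_eq_of_blocks_nil (pvKept rows) ordered (pvKept rows).length j hjT.le
            (fun r hr => pvBlock_nil_of_le _ _ r hr), ← hsel]
          have h1 : (max 0 n).toNat = sel.length := by omega
          rw [h1, List.take_length]

theorem pvA_eq (rows : List (List (String × String))) (n : Int) :
    choose_balanced_video_rows rows n
      = (pvThird (pvRounds (pvKept rows)
          (PySem.List.sorted (PySem.Set.ofList ((pvKept rows).map pvPos)) (fun x => x) false)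
          (pvKept rows).length)).take (max 0 n).toNat := by
  simp only [choose_balanced_video_rows]
  rw [keys_pvGroupA]
  exact pvWhileA_spec rows _ n (PySem.List.sorted_ofList_pairwise_lt _)
    (fun p => by rw [PySem.List.mem_sorted]; exact PySem.Set.mem_ofList _ p)
    (rows.length + 1) 0 (pvGroupA rows) []
    (fun p => by rw [getD_pvGroupA, List.drop_zero])
    (fun p hp => by
      rw [PySem.Dict.contains_iff_mem_keys, keys_pvGroupA]
      rw [PySem.List.mem_sorted] at hp
      exact hp)
    (by rw [keys_pvGroupA]; exact PySem.Set.nodup_ofList _)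
    (by rw [keys_pvGroupA]; exact PySem.List.sorted_perm _ _ _)
    (by simp [pvRounds, pvThird])
    (by simp)
    (by omega)
    (by
      unfold pvKept
      have := List.length_filter_le (fun r => decide (¬ pvFile r = "")) rows
      omega)

theorem pvB_eq (rows : List (List (String × String))) (n : Int) :
    choose_balanced_video_rows_alt rows n
      = (pvThird (pvRounds (pvKept rows)
          (PySem.List.sorted (PySem.Set.ofList ((pvKept rows).map pvPos)) (fun x => x) false)
          (pvKept rows).length)).take (max 0 n).toNat := by
  simp only [choose_balanced_video_rows_alt]
  rw [pv_sorted2_tagged rows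
    (PySem.List.sorted (PySem.Set.ofList ((pvKept rows).map pvPos)) (fun x => x) false)
    (PySem.List.sorted_ofList_pairwise_lt _)
    (fun p => by rw [PySem.List.mem_sorted]; exact PySem.Set.mem_ofList _ p)]
  unfold pvThird
  rw [List.map_take]

-- ===== VERDICT (by name: the statement is the Claim_ definition above) =====
theorem choose_balanced_video_rows_spec : Claim_equal_choose_balanced_video_rows := by
  intro rows n _
  unfold Spec_choose_balanced_video_rows
  rw [pvA_eq, pvB_eq]
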